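-- pv_equiv track=rewrite | github.com/DanielO29/PythonVerkefni | Upprifjun1.py | finnaS
-- ===== SOURCE A (Python) =====
-- def finnaS(strengur):
--     nyrstr=" "
--     for x in strengur:
--         if x=="s" or x=="S" or x == " ":
--             nyrstr = nyrstr + x
--         else:
--             nyrstr = nyrstr + "$"
--     return nyrstr
-- ===== SOURCE B (Python) =====
-- import re
--
-- def finnaS(strengur):
--     return " " + re.sub(r'[^sS ]', '$', strengur)
-- ===== Notes on version B (the rewrite author's own statement) =====
-- stated objective: idiomatic
-- what changed: Replaced the explicit per-character accumulation loop by a single regex substitution that maps each disallowed character to the marker, prepended to A's literal leading space.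
import Mathlib
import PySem

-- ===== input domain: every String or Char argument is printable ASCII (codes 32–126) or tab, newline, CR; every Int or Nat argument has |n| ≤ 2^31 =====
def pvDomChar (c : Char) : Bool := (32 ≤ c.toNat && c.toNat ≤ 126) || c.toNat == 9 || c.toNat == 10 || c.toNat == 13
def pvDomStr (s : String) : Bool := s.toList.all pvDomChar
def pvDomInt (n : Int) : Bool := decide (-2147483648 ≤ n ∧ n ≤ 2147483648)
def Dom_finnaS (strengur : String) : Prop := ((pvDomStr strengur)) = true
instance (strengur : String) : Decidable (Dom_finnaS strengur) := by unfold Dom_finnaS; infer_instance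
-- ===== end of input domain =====

-- B replaces A's accumulating loop by a single per-character substitution map (regex in Python); idiomatic, same result.

-- ===== PORT A =====
-- literal port of A's loop: fold over the characters, appending to the accumulator string
def finnaS (strengur : String) : String :=
  strengur.toList.foldl
    (fun nyrstr x =>
      if x = 's' ∨ x = 'S' ∨ x = ' ' then String.ofList (nyrstr.toList ++ [x])
      else String.ofList (nyrstr.toList ++ ['$']))
    " "

-- ===== PORT B =====
-- re.sub(r'[^sS ]', '$', s): each char not in [sS ] becomes '$'; others pass through
def finnaS_alt (strengur : String) : String :=
  String.ofList (' ' :: strengur.toList.map (fun c => if c = 's' ∨ c = 'S' ∨ c = ' ' then c else '$'))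

-- ===== PRECONDITION & SPEC =====
def Spec_finnaS (strengur : String) (out : String) : Prop := out = finnaS_alt strengur
instance (strengur : String) (out : String) : Decidable (Spec_finnaS strengur out) := by unfold Spec_finnaS; infer_instance

-- ===== CLAIM (what is proved, stated in full; the proofs are below) =====
def Claim_equal_finnaS : Prop := ∀ (strengur : String), Dom_finnaS strengur → Spec_finnaS strengur (finnaS strengur)

-- ===== LEMMAS AND PROOFS =====
theorem finnaS_foldl_acc (l : List Char) (acc : List Char) :
    l.foldl
      (fun nyrstr x =>
        if x = 's' ∨ x = 'S' ∨ x = ' ' then String.ofList (nyrstr.toList ++ [x])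
        else String.ofList (nyrstr.toList ++ ['$']))
      (String.ofList acc)
    = String.ofList (acc ++ l.map (fun c => if c = 's' ∨ c = 'S' ∨ c = ' ' then c else '$')) := by
  induction l generalizing acc with
  | nil => simp
  | cons x xs ih =>
    simp only [List.foldl, List.map]
    by_cases h : x = 's' ∨ x = 'S' ∨ x = ' '
    · rw [if_pos h, String.toList_ofList, ih (acc ++ [x])]
      simp [h]
    · rw [if_neg h, String.toList_ofList, ih (acc ++ ['$'])]
      simp [h]

-- ===== VERDICT (by name: the statement is the Claim_ definition above) =====
theorem finnaS_spec : Claim_equal_finnaS := by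
  intro s _
  show finnaS s = finnaS_alt s
  have : (" " : String) = String.ofList [' '] := rfl
  rw [finnaS, finnaS_alt, this, finnaS_foldl_acc]
  rfl
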